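-- pv_equiv track=rewrite | github.com/MomenSirri/momi-forge | utils.py | _choose_progress_text
-- ===== SOURCE A (Python) =====
-- def _is_live_progress_text(text: str) -> bool:
--     text = text.strip()
--     if not text:
--         return False
--
--     lower = text.lower()
--     if text.startswith("[comfy-log]"):
--         return True
--     if text.startswith("Running node "):
--         return True
--     if text.startswith("Still running"):
--         return True
--     if "queue remaining" in lower:
--         return True
--     if "execution finished" in lower:
--         return True
--     if "collecting outputs" in lower:
--         return True
--     if "fetching execution history" in lower:
--         return True
--     if "job completed. returning" in lower:
--         return True
--     return False
--
-- def _choose_progress_text(text_candidates: list[str]) -> str | None: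
--     comfy_lines = [line for line in text_candidates if line.startswith("[comfy-log]")]
--     if comfy_lines:
--         return comfy_lines[-1]
--
--     live_lines = [line for line in text_candidates if _is_live_progress_text(line)]
--     if live_lines:
--         return live_lines[-1]
--
--     if text_candidates:
--         return text_candidates[-1]
--     return None
-- ===== SOURCE B (Python) =====
-- def _is_live_progress_text(text: str) -> bool:
--     text = text.strip()
--     if not text:
--         return False
--
--     lower = text.lower()
--     if text.startswith("[comfy-log]"):
--         return True
--     if text.startswith("Running node "):
--         return True
--     if text.startswith("Still running"):
--         return True
--     if "queue remaining" in lower: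
--         return True
--     if "execution finished" in lower:
--         return True
--     if "collecting outputs" in lower:
--         return True
--     if "fetching execution history" in lower:
--         return True
--     if "job completed. returning" in lower:
--         return True
--     return False
--
-- def _choose_progress_text(text_candidates: list[str]) -> str | None:
--     # Single reverse scan: the first comfy line seen is the last one overall;
--     # remember the first live line seen (= last live overall) for the fallback.
--     live = None
--     for line in reversed(text_candidates):
--         if line.startswith("[comfy-log]"):
--             return line
--         if live is None and _is_live_progress_text(line):
--             live = line
--     if live is not None:
--         return live
--     if text_candidates:
--         return text_candidates[-1]
--     return None
-- ===== Notes on version B (the rewrite author's own statement) =====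
-- stated objective: simpler
-- what changed: Replaces the two full filtering passes (comfy list, live list) with one short-circuiting reverse scan that returns the first comfy line met and records at most one live line.
import Mathlib
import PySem

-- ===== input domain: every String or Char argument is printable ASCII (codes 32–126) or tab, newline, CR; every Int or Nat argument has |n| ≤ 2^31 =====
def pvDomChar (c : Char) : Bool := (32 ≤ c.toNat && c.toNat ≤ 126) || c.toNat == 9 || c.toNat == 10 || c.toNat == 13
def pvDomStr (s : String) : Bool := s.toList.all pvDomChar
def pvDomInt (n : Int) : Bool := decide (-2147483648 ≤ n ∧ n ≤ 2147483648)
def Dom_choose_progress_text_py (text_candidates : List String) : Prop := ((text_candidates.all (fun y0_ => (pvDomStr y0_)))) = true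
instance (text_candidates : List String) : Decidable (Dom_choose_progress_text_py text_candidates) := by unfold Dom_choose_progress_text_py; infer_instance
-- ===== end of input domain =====

-- B replaces A's two full filtering passes by one short-circuiting reverse scan (simpler, no intermediate lists).

-- ===== PORT A =====
-- shared helper: _is_live_progress_text (used verbatim by both Pythons)
def is_live_progress_text (text : String) : Bool :=
  let t := PySem.Str.strip text
  if t.toList = [] then false
  else
    let lower := PySem.Str.lower t
    if PySem.Str.startswith t "[comfy-log]" then true
    else if PySem.Str.startswith t "Running node " then true
    else if PySem.Str.startswith t "Still running" then true
    else if PySem.Str.isIn "queue remaining" lower then true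
    else if PySem.Str.isIn "execution finished" lower then true
    else if PySem.Str.isIn "collecting outputs" lower then true
    else if PySem.Str.isIn "fetching execution history" lower then true
    else if PySem.Str.isIn "job completed. returning" lower then true
    else false

def choose_progress_text_py (text_candidates : List String) : Option String :=
  let comfy_lines := text_candidates.filter (fun line => PySem.Str.startswith line "[comfy-log]")
  if comfy_lines ≠ [] then PySem.List.pyGet? comfy_lines (-1)
  else
    let live_lines := text_candidates.filter (fun line => is_live_progress_text line)
    if live_lines ≠ [] then PySem.List.pyGet? live_lines (-1)
    else if text_candidates ≠ [] then PySem.List.pyGet? text_candidates (-1)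
    else none

-- ===== PORT B =====
-- the reverse-scan loop of Source B: `rev` is the rest of reversed(text_candidates), `live` the recorded line
def altLoop (rev : List String) (live : Option String) (orig : List String) : Option String :=
  match rev with
  | [] =>
    match live with
    | some l => some l
    | none => if orig ≠ [] then PySem.List.pyGet? orig (-1) else none
  | line :: rest =>
    if PySem.Str.startswith line "[comfy-log]" then some line
    else if live.isNone && is_live_progress_text line then altLoop rest (some line) orig
    else altLoop rest live orig

def choose_progress_text_py_alt (text_candidates : List String) : Option String :=
  altLoop text_candidates.reverse none text_candidates

-- ===== PRECONDITION & SPEC =====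
def Spec_choose_progress_text_py (text_candidates : List String) (out : Option String) : Prop := out = choose_progress_text_py_alt text_candidates
instance (text_candidates : List String) (out : Option String) : Decidable (Spec_choose_progress_text_py text_candidates out) := by unfold Spec_choose_progress_text_py; infer_instance

-- ===== CLAIM (what is proved, stated in full; the proofs are below) =====
def Claim_equal_choose_progress_text_py : Prop := ∀ (text_candidates : List String), Dom_choose_progress_text_py text_candidates → Spec_choose_progress_text_py text_candidates (choose_progress_text_py text_candidates)

-- ===== LEMMAS AND PROOFS =====

-- invariant of the reverse-scan loop, phrased against A's filtered-lists view of rev.reverse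
theorem altLoop_spec (rev : List String) (live : Option String) (orig : List String) :
    altLoop rev live orig =
      (let comfy := rev.reverse.filter (fun line => PySem.Str.startswith line "[comfy-log]")
       if comfy ≠ [] then comfy.getLast?
       else match live with
         | some l => some l
         | none =>
           let lv := rev.reverse.filter (fun line => is_live_progress_text line)
           if lv ≠ [] then lv.getLast?
           else if orig ≠ [] then PySem.List.pyGet? orig (-1) else none) := by
  induction rev generalizing live with
  | nil => cases live <;> simp [altLoop]
  | cons x rest ih =>
    simp only [altLoop, List.reverse_cons, List.filter_append, List.filter_cons,
      List.filter_nil, List.append_nil]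
    by_cases hc : PySem.Str.startswith x "[comfy-log]" = true
    · simp only [hc, if_true, ite_true]
      simp only [ne_eq, List.append_eq_nil_iff, List.cons_ne_self, and_false,
        not_false_eq_true, if_true, ite_true, List.getLast?_concat]
    · rw [Bool.not_eq_true] at hc
      simp only [hc, Bool.false_eq_true, if_false, ite_false, List.append_nil]
      by_cases hl : (live.isNone && is_live_progress_text x) = true
      · obtain ⟨h1, h2⟩ := Bool.and_eq_true_iff.mp hl
        have hlive : live = none := Option.isNone_iff_eq_none.mp h1
        subst hlive
        simp only [hl, if_true, ite_true, ih]
        by_cases hcf : rest.reverse.filter (fun line => PySem.Str.startswith line "[comfy-log]") = []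
        · simp only [hcf, ne_eq, not_true_eq_false, if_false, ite_false,
            h2, if_true, ite_true]
          simp [List.getLast?_concat]
        · simp only [ne_eq, hcf, not_false_eq_true, if_true, ite_true]
      · rw [Bool.not_eq_true] at hl
        simp only [hl, Bool.false_eq_true, if_false, ite_false, ih]
        by_cases hcf : rest.reverse.filter (fun line => PySem.Str.startswith line "[comfy-log]") = []
        · cases live with
          | some l => rfl
          | none =>
            have h2 : is_live_progress_text x = false := by
              simpa using hl
            simp only [h2, Bool.false_eq_true, if_false, ite_false, List.append_nil]
        · simp only [ne_eq, hcf, not_false_eq_true, if_true, ite_true]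

-- ===== VERDICT (by name: the statement is the Claim_ definition above) =====
theorem choose_progress_text_py_spec : Claim_equal_choose_progress_text_py := by
  intro tc _
  unfold Spec_choose_progress_text_py choose_progress_text_py choose_progress_text_py_alt
  rw [altLoop_spec]
  simp only [List.reverse_reverse, PySem.List.pyGet?_neg_one]
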